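-- pv_equiv track=rewrite | github.com/gnorm25/gjaignorm | 프로그래머스/0/120864. 숨어있는 숫자의 덧셈 （2）/숨어있는 숫자의 덧셈 （2）.py | solution
-- ===== SOURCE A (Python) =====
-- def solution(my_string):
--     answer= 0
--     temp= ''
--     for i in my_string:
--         if i.isdigit():
--             temp += i
--         else:
--             if temp:
--                 answer += int(temp)
--                 temp= ''
--     if temp:
--         answer += int(temp)
--     return answer
-- ===== SOURCE B (Python) =====
-- def solution(my_string):
--     # Right-to-left positional accumulation: each digit contributes its value times
--     # the power of 10 for its position within its digit run; no substrings, no int().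
--     total = 0
--     place = 1
--     for c in reversed(my_string):
--         if c.isdigit():
--             total += (ord(c) - 48) * place
--             place *= 10
--         else:
--             place = 1
--     return total
-- ===== Notes on version B (the rewrite author's own statement) =====
-- stated objective: alternative
-- what changed: Replaces A's build-a-digit-substring-then-int() accumulator loop with a right-to-left scan that adds each digit's value times a running power-of-ten place weight, so no substrings are built and int() is never called.
import Mathlib
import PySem

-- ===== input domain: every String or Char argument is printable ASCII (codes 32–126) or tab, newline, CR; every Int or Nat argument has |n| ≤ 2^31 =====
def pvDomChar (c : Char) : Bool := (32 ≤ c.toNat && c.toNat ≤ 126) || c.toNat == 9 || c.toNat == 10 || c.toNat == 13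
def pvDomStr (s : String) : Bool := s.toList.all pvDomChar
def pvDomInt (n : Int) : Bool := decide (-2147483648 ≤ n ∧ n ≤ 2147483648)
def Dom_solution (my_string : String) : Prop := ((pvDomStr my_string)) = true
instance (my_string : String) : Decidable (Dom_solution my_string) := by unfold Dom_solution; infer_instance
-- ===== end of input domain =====

-- B replaces A's build-a-digit-substring-then-int() loop with a reversed scan adding each digit's value times a running power-of-ten place weight (objective: alternative algorithm, same O(n)).


-- ===== PORT A =====
-- int(temp): at every call site temp is (by the loop's construction) a run of characters
-- '0'..'9' (PySem.Chars.isdigit is exactly '0' ≤ c ≤ '9'), and on such nonempty runs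
-- Python's int() is exactly this base-10 left fold; hand-ported because the general
-- PySem.Int.ofChars? hides its digit accumulator in a private helper. Exact here.
def pvIntDigits (t : List Char) : Int :=
  t.foldl (fun a c => 10 * a + ((c.toNat : Int) - 48)) 0

-- 'if temp: answer += int(temp); temp = ""' — the flush A performs on a non-digit and at the end
def pvFlush (ans : Int) (temp : List Char) : Int :=
  if temp = [] then ans else ans + pvIntDigits temp

-- A's for-loop over the characters, state (answer, temp)
def pvLoopA : List Char → Int → List Char → Int
  | [], ans, temp => pvFlush ans temp
  | c :: cs, ans, temp =>
    if PySem.Chars.isdigit c then pvLoopA cs ans (temp ++ [c])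
    else pvLoopA cs (pvFlush ans temp) []

def solution (my_string : String) : Int := pvLoopA my_string.toList 0 []

-- ===== PORT B =====
-- one step of B's loop body, state (total, place)
def pvStepB (st : Int × Int) (c : Char) : Int × Int :=
  if PySem.Chars.isdigit c then (st.1 + ((c.toNat : Int) - 48) * st.2, 10 * st.2)
  else (st.1, 1)

-- 'for c in reversed(my_string): …' with total=0, place=1; return total
def solution_alt (my_string : String) : Int :=
  (my_string.toList.reverse.foldl pvStepB (0, 1)).1

-- ===== PRECONDITION & SPEC =====
def Spec_solution (my_string : String) (out : Int) : Prop := out = solution_alt my_string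
instance (my_string : String) (out : Int) : Decidable (Spec_solution my_string out) := by unfold Spec_solution; infer_instance

-- ===== CLAIM (what is proved, stated in full; the proofs are below) =====
def Claim_equal_solution : Prop := ∀ (my_string : String), Dom_solution my_string → Spec_solution my_string (solution my_string)

-- ===== LEMMAS AND PROOFS =====
-- B's fold over the reversed list, seen as a foldr over the original list
def pvB (l : List Char) : Int × Int := l.foldr (fun c st => pvStepB st c) (0, 1)

theorem pvFlush_eq (ans : Int) (temp : List Char) :
    pvFlush ans temp = ans + pvIntDigits temp := by
  cases temp with
  | nil => simp [pvFlush, pvIntDigits]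
  | cons t ts => simp [pvFlush]

theorem pvIntDigits_append (t : List Char) (c : Char) :
    pvIntDigits (t ++ [c]) = 10 * pvIntDigits t + ((c.toNat : Int) - 48) := by
  simp [pvIntDigits, List.foldl_append]

-- loop invariant: A's loop from state (ans, temp) yields ans + B's total over the rest,
-- plus the pending run's value scaled by B's place weight for the leading run of the rest
theorem pv_main (l : List Char) : ∀ (ans : Int) (temp : List Char),
    pvLoopA l ans temp = ans + (pvB l).1 + pvIntDigits temp * (pvB l).2 := by
  induction l with
  | nil =>
    intro ans temp
    simp [pvLoopA, pvFlush_eq, pvB]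
  | cons c cs ih =>
    intro ans temp
    by_cases hc : PySem.Chars.isdigit c = true
    · rw [pvLoopA]
      simp only [hc, if_true]
      rw [ih ans (temp ++ [c]), pvIntDigits_append]
      simp only [pvB, List.foldr_cons, pvStepB, hc, if_true]
      ring
    · simp only [Bool.not_eq_true] at hc
      rw [pvLoopA]
      simp only [hc, Bool.false_eq_true, if_false]
      rw [ih (pvFlush ans temp) [], pvFlush_eq]
      simp only [pvB, List.foldr_cons, pvStepB, hc, Bool.false_eq_true, if_false]
      simp [pvIntDigits]
      ring

theorem pvB_eq (l : List Char) : l.reverse.foldl pvStepB (0, 1) = pvB l := by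
  rw [List.foldl_reverse]; rfl

-- ===== VERDICT (by name: the statement is the Claim_ definition above) =====
theorem solution_spec : Claim_equal_solution := by
  intro s _
  unfold Spec_solution solution solution_alt
  rw [pv_main s.toList 0 [], pvB_eq]
  simp [pvIntDigits]
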